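-- pv_equiv track=rewrite | github.com/jeremymatt/pause_classification | shared_functions/NLP/nlpFunctions.py | splitByPandC
-- ===== SOURCE A (Python) =====
-- def splitByPandC(data, labels):
--     cWords = []
--     pWords = []
--     oWords = []
--     for (words,label) in zip(data,labels):
--         if label == 0:
--             pWords += words
--         elif label == 1:
--             cWords += words
--         else:
--             oWords += words
--     return pWords, cWords, oWords
-- ===== SOURCE B (Python) =====
-- def splitByPandC(data, labels):
--     pairs = list(zip(data, labels))
--     pWords = [w for words, label in pairs if label == 0 for w in words]
--     cWords = [w for words, label in pairs if label == 1 for w in words]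
--     oWords = [w for words, label in pairs if label not in (0, 1) for w in words]
--     return pWords, cWords, oWords
-- ===== Notes on version B (the rewrite author's own statement) =====
-- stated objective: alternative
-- what changed: Replaces the single branching accumulator loop with three independent filtered flattening comprehensions over zip(data,labels), one pass per output list.
import Mathlib
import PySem

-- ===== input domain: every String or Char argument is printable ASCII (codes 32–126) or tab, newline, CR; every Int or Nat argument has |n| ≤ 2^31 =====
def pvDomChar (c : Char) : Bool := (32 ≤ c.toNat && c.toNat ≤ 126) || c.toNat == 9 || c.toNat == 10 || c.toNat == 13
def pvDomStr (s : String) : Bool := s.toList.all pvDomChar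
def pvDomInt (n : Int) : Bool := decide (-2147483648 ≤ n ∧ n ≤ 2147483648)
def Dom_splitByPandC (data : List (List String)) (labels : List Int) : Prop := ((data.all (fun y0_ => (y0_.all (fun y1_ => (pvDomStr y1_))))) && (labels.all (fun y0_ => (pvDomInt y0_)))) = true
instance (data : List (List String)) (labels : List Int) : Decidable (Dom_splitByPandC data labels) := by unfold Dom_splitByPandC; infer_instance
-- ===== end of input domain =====

-- B replaces A's single branching accumulator loop with three independent filtered flattening passes over zip(data,labels) (alternative decomposition, same cost).


-- ===== PORT A =====
-- Port of A: one fold over zip(data,labels) carrying the three accumulators, branching on the label.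
def splitByPandC (data : List (List String)) (labels : List Int) : List String × List String × List String :=
  let st := (data.zip labels).foldl
    (fun (acc : List String × List String × List String) wl =>
      let (cWords, pWords, oWords) := acc
      let (words, label) := wl
      if label = 0 then (cWords, pWords ++ words, oWords)
      else if label = 1 then (cWords ++ words, pWords, oWords)
      else (cWords, pWords, oWords ++ words))
    ([], [], [])
  (st.2.1, st.1, st.2.2)

-- ===== PORT B =====
-- Port of B: three independent filtered flattening passes over zip(data,labels).
def splitByPandC_alt (data : List (List String)) (labels : List Int) : List String × List String × List String :=
  let pairs := data.zip labels
  ((pairs.filter (fun p => p.2 == 0)).flatMap (fun p => p.1),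
   (pairs.filter (fun p => p.2 == 1)).flatMap (fun p => p.1),
   (pairs.filter (fun p => !(p.2 == 0) && !(p.2 == 1))).flatMap (fun p => p.1))

-- ===== PRECONDITION & SPEC =====
def Spec_splitByPandC (data : List (List String)) (labels : List Int) (out : List String × List String × List String) : Prop := out = splitByPandC_alt data labels
instance (data : List (List String)) (labels : List Int) (out : List String × List String × List String) : Decidable (Spec_splitByPandC data labels out) := by unfold Spec_splitByPandC; infer_instance

-- ===== CLAIM (what is proved, stated in full; the proofs are below) =====
def Claim_equal_splitByPandC : Prop := ∀ (data : List (List String)) (labels : List Int), Dom_splitByPandC data labels → Spec_splitByPandC data labels (splitByPandC data labels)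

-- ===== LEMMAS AND PROOFS =====

-- ===== VERDICT (by name: the statement is the Claim_ definition above) =====
-- Invariant of A's fold: running accumulators are the filtered flattenings, prefixed by the start state.
theorem fold_split (l : List (List String × Int)) (c p o : List String) :
    l.foldl
      (fun (acc : List String × List String × List String) wl =>
        let (cWords, pWords, oWords) := acc
        let (words, label) := wl
        if label = 0 then (cWords, pWords ++ words, oWords)
        else if label = 1 then (cWords ++ words, pWords, oWords)
        else (cWords, pWords, oWords ++ words))
      (c, p, o)
    = (c ++ (l.filter (fun q => q.2 == 1)).flatMap (fun q => q.1),
       p ++ (l.filter (fun q => q.2 == 0)).flatMap (fun q => q.1),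
       o ++ (l.filter (fun q => !(q.2 == 0) && !(q.2 == 1))).flatMap (fun q => q.1)) := by
  induction l generalizing c p o with
  | nil => simp
  | cons hd tl ih =>
    obtain ⟨w, lab⟩ := hd
    by_cases h0 : lab = 0
    · simp [h0, List.foldl_cons, ih, List.filter_cons]
    · by_cases h1 : lab = 1
      · simp [h0, h1, List.foldl_cons, ih]
      · simp [h0, h1, List.foldl_cons, ih]

theorem splitByPandC_spec : Claim_equal_splitByPandC := by
  intro data labels _
  unfold Spec_splitByPandC splitByPandC splitByPandC_alt
  simp [fold_split]
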